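/- GENERATED by farm/mkstatement.py from design/units.tsv (unit `vorbis_decode_initial.6`) and the assertions of Vorbis/Spec/DecodeInitial.lean — do not edit.
   THE STATEMENT of the proof unit `vorbis_decode_initial.6`: segment 6 of `vorbis_decode_initial` (18 instructions; entries 0x113265;
   exits 0x113282; ranges 0x113265-0x11327e + 0x1132df-0x113312)
   takes each of its entry assertions to one of its exit assertions (`Vorbis.Spec.vorbis_decode_initial.Seg6`), given the contracts of its callees.
   What the names mean: Vorbis/Spec/Basic.lean (the shared hypotheses), Vorbis/Spec/DecodeInitial.lean (the assertions). The theorem to prove: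
   `theorem vorbis_decode_initial_6_ok : Vorbis.Spec.vorbis_decode_initial_6.Statement`. -/
import Vorbis.Spec.DecodeInitial
import Vorbis.Spec.Reader
namespace Vorbis.Spec.vorbis_decode_initial_6
open X86 X86.User Asan

/-- The statement of unit `vorbis_decode_initial.6`. -/
def Statement : Prop :=
  ∀ (Lay : Layout) (_hLay : Lay.hi = 0x1000000) (μ : Microarch) (_hμ : UserX.MicroOK μ) (u₀ : State)
    (_hcode : HasCodeNat Lay u₀ Vorbis.L.vorbis_decode_initial.entry Vorbis.Code.code_vorbis_decode_initial.nat Vorbis.L.vorbis_decode_initial.size)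
    (_h_asan_load4_noabort : Asan.SmallCheck Lay μ Vorbis.WayInv (Vorbis.CodeOK u₀) [.rax, .rcx, .rdx] 4 Vorbis.L.__asan_load4_noabort.entry)
    (_h_get_bits : ∀ (others : List Obj) (frames : List (Nat × FrameLayout)) (Blk : Block → Prop) (len : Nat), Calls Lay μ Vorbis.WayInv (Vorbis.conv u₀) Vorbis.L.get_bits.entry (Vorbis.Spec.get_bits.spec others frames Blk len)),
    Vorbis.Spec.vorbis_decode_initial.Seg6 Lay μ u₀

end Vorbis.Spec.vorbis_decode_initial_6
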